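-- pv_equiv track=rewrite | github.com/swdevsw98/programers_python | 입문/개미군단.py | solution
-- ===== SOURCE A (Python) =====
-- def solution(hp):
--     answer = 0
--     ant = [5,3,1]
--
--     for i in ant :
--         temp = hp//i
--         answer += temp
--         hp -= i * temp
--
--     return answer
-- ===== SOURCE B (Python) =====
-- def solution(hp):
--     r5 = hp % 5
--     return hp // 5 + r5 // 3 + r5 % 3
-- ===== Notes on version B (the rewrite author's own statement) =====
-- stated objective: simpler
-- what changed: Replaced the loop over the coin list with one closed-form expression of floor divisions and remainders.
import Mathlib
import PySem

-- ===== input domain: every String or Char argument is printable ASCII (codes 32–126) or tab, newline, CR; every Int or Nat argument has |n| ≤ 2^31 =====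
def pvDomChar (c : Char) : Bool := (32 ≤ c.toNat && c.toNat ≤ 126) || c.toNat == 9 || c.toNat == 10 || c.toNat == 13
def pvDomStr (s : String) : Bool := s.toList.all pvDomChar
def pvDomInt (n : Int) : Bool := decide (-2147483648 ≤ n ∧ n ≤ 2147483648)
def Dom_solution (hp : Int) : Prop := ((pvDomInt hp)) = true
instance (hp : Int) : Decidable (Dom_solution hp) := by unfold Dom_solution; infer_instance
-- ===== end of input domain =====

-- ===== PORT A =====
-- B replaces A's loop over [5,3,1] with one closed-form expression (objective: simpler).
def solution (hp : Int) : Int :=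
  (([5, 3, 1] : List Int).foldl (fun (s : Int × Int) i =>
    let temp := PySem.Int.floordiv s.2 i
    (s.1 + temp, s.2 - i * temp)) (0, hp)).1

-- ===== PORT B =====
def solution_alt (hp : Int) : Int :=
  let r5 := PySem.Int.mod hp 5
  PySem.Int.floordiv hp 5 + PySem.Int.floordiv r5 3 + PySem.Int.mod r5 3

-- ===== PRECONDITION & SPEC =====
def Spec_solution (hp : Int) (out : Int) : Prop := out = solution_alt hp
instance (hp : Int) (out : Int) : Decidable (Spec_solution hp out) := by unfold Spec_solution; infer_instance

-- ===== CLAIM (what is proved, stated in full; the proofs are below) =====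
def Claim_equal_solution : Prop := ∀ (hp : Int), Dom_solution hp → Spec_solution hp (solution hp)

-- ===== LEMMAS AND PROOFS =====

-- ===== VERDICT (by name: the statement is the Claim_ definition above) =====
theorem solution_spec : Claim_equal_solution := by
  intro hp _
  unfold Spec_solution solution solution_alt
  simp only [List.foldl]
  have h5 := PySem.Int.floordiv_mul_add_mod hp 5
  have h3 := PySem.Int.floordiv_mul_add_mod (PySem.Int.mod hp 5) 3
  have h1 := PySem.Int.floordiv_mul_add_mod (PySem.Int.mod (PySem.Int.mod hp 5) 3) 1
  have hm1l := PySem.Int.mod_nonneg (PySem.Int.mod (PySem.Int.mod hp 5) 3) (b := 1) (by norm_num)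
  have hm1u := PySem.Int.mod_lt (PySem.Int.mod (PySem.Int.mod hp 5) 3) (b := 1) (by norm_num)
  have e5 : hp - 5 * PySem.Int.floordiv hp 5 = PySem.Int.mod hp 5 := by omega
  rw [e5]
  have e3 : PySem.Int.mod hp 5 - 3 * PySem.Int.floordiv (PySem.Int.mod hp 5) 3
      = PySem.Int.mod (PySem.Int.mod hp 5) 3 := by omega
  rw [e3]
  have e1 : PySem.Int.floordiv (PySem.Int.mod (PySem.Int.mod hp 5) 3) 1
      = PySem.Int.mod (PySem.Int.mod hp 5) 3 := by omega
  rw [e1]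
  ring
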